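-- pv_equiv track=rewrite | github.com/fleshuu/News-recommender-system | recommender/TextProcessing.py | tagUniter
-- ===== SOURCE A (Python) =====
-- def tagUniter(list_of_iob):
--     """B bolon araas ni zalgagdah I tagtai NER ugnuudiig
--     "_"-aar 1 buren ug bolgoh
--
--     Parameters
--     ----------
--     list_of_iob: list[str,str]
--         element=[word, tag_of_the_word] .i.e [['Trump', 'B-Person'],...]
--
--     Returns
--     -------
--     list[str,str]
--         .i.e [['Donald_Trump','Person'],...]
--     """
--     word = ''
--     tag = ''
--     unitedList = []
--     for tagged in list_of_iob:
--         if tagged[1][0] == 'B' and word != '':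
--             unitedList += [[word, tag]]
--             word = ''
--         if tagged[1][0] == 'I':
--             word += '_'
--         word += tagged[0]
--         tag = tagged[1][2:]
--     return unitedList + [[word, tag]]
-- ===== SOURCE B (Python) =====
-- def tagUniter(list_of_iob):
--     # Split the IOB sequence into groups (a new group starts at each
--     # B-tagged element), then render each group as [joined_word, tag].
--     groups = [[]]
--     for tagged in list_of_iob:
--         if tagged[1][0] == 'B' and groups[-1]:
--             groups.append([])
--         groups[-1].append(tagged)
--     united = []
--     for g in groups:
--         word = ''.join(('_' if t[1][0] == 'I' else '') + t[0] for t in g)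
--         tag = g[-1][1][2:] if g else ''
--         united.append([word, tag])
--     return united
-- ===== Notes on version B (the rewrite author's own statement) =====
-- stated objective: alternative
-- what changed: A builds the result in one pass mutating word/tag accumulator strings; B first splits the input into groups starting at each B-tagged element and then renders each group independently. Pre_ excludes elements that make A raise IndexError (fewer than two components or an empty tag) and elements with an empty word text, a degenerate corner on which A's flush test (accumulated string non-empty) and B's (current group non-empty) are equally defensible readings of 'a token is pending'.
-- outside the precondition, e.g. on tagUniter([['', 'B-X'], ['a', 'B-Y']]): A returns [['a', 'Y']], B returns [['', 'X'], ['a', 'Y']]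
import Mathlib
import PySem

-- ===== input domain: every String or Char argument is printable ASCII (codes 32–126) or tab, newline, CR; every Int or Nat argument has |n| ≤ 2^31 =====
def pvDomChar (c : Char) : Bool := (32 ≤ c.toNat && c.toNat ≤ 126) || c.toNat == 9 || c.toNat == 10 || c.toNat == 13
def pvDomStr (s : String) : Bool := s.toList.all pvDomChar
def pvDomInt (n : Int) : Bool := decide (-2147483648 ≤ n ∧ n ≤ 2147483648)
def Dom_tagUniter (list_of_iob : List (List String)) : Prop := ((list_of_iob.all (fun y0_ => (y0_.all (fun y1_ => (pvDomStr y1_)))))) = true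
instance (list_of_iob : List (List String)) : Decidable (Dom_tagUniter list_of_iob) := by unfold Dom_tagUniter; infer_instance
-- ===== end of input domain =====

-- B replaces A's single accumulating pass by a group-then-render decomposition (same cost, alternative structure).


-- ===== PORT A =====
-- A's loop: state (word, tag, unitedList); flush on a 'B' tag with non-empty word.
def tagUniterStep (st : String × String × List (List String)) (tagged : List String) :
    String × String × List (List String) :=
  let t1 := PySem.List.pyGetD tagged 1 ""
  let st1 :=
    if PySem.Str.pyGet? t1 0 = some 'B' ∧ st.1 ≠ "" then
      ("", st.2.2 ++ [[st.1, st.2.1]])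
    else (st.1, st.2.2)
  let word1 := if PySem.Str.pyGet? t1 0 = some 'I' then st1.1 ++ "_" else st1.1
  (word1 ++ PySem.List.pyGetD tagged 0 "", PySem.Str.slice t1 (some 2) none, st1.2)

def tagUniter (list_of_iob : List (List String)) : List (List String) :=
  let fin := list_of_iob.foldl tagUniterStep ("", "", [])
  fin.2.2 ++ [[fin.1, fin.2.1]]

-- ===== PORT B =====
-- per-element contribution to the group's word
def pvContrib (t : List String) : String :=
  (if PySem.Str.pyGet? (PySem.List.pyGetD t 1 "") 0 = some 'I' then "_" else "")
    ++ PySem.List.pyGetD t 0 ""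

-- render one group as [word, tag]
def pvRender (g : List (List String)) : List String :=
  [PySem.Str.join "" (g.map pvContrib),
   match g.getLast? with
   | some t => PySem.Str.slice (PySem.List.pyGetD t 1 "") (some 2) none
   | none => ""]

-- grouping pass: state (finished groups, current group)
def tagUniterGroupStep (st : List (List (List String)) × List (List String))
    (tagged : List String) : List (List (List String)) × List (List String) :=
  let st1 :=
    if PySem.Str.pyGet? (PySem.List.pyGetD tagged 1 "") 0 = some 'B' ∧ st.2 ≠ [] then
      (st.1 ++ [st.2], ([] : List (List String)))
    else st
  (st1.1, st1.2 ++ [tagged])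

def tagUniter_alt (list_of_iob : List (List String)) : List (List String) :=
  let st := list_of_iob.foldl tagUniterGroupStep ([], [])
  (st.1 ++ [st.2]).map pvRender

-- ===== PRECONDITION & SPEC =====
-- Pre_ excludes the inputs on which A raises IndexError (an element with fewer than two
-- components, or an empty tag string), and elements with an empty word text — a degenerate
-- corner on which A's flush test (accumulated string non-empty) and B's (current group
-- non-empty) are equally defensible readings of 'a token is pending'.
def Pre_tagUniter (list_of_iob : List (List String)) : Prop :=
  ∀ t ∈ list_of_iob, 2 ≤ t.length ∧ t.getD 1 "" ≠ "" ∧ t.getD 0 "" ≠ ""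
instance (list_of_iob : List (List String)) : Decidable (Pre_tagUniter list_of_iob) := by
  unfold Pre_tagUniter; infer_instance

def pvWitness_tagUniter : List (List String) :=
  [["Donald", "B-Person"], ["Trump", "I-Person"]]

def Spec_tagUniter (list_of_iob : List (List String)) (out : List (List String)) : Prop := out = tagUniter_alt list_of_iob
instance (list_of_iob : List (List String)) (out : List (List String)) : Decidable (Spec_tagUniter list_of_iob out) := by unfold Spec_tagUniter; infer_instance

-- ===== CLAIM (what is proved, stated in full; the proofs are below) =====
def Claim_equal_tagUniter : Prop := ∀ (list_of_iob : List (List String)), Dom_tagUniter list_of_iob → Pre_tagUniter list_of_iob → Spec_tagUniter list_of_iob (tagUniter list_of_iob)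

-- ===== LEMMAS AND PROOFS =====

def pvWordOf (g : List (List String)) : String := PySem.Str.join "" (g.map pvContrib)
def pvTagOf (g : List (List String)) : String :=
  match g.getLast? with
  | some t => PySem.Str.slice (PySem.List.pyGetD t 1 "") (some 2) none
  | none => ""

theorem pvRender_eq (g : List (List String)) : pvRender g = [pvWordOf g, pvTagOf g] := rfl

theorem pvJoinNil (l : List (List Char)) : PySem.Chars.join [] l = l.flatten := by
  simp [PySem.Chars.join, List.intercalate]
  induction l with
  | nil => simp
  | cons a t ih => cases t <;> simp_all [List.intersperse]

theorem pvJoin_empty_append (l : List String) (x : String) :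
    PySem.Str.join "" (l ++ [x]) = PySem.Str.join "" l ++ x := by
  simp [PySem.Str.join, pvJoinNil, String.ofList_append]

theorem pvWordOf_append (g : List (List String)) (t : List String) :
    pvWordOf (g ++ [t]) = pvWordOf g ++ pvContrib t := by
  simp [pvWordOf, pvJoin_empty_append]

theorem pvWordOf_nil : pvWordOf [] = "" := rfl

theorem pvWordOf_singleton (t : List String) : pvWordOf [t] = pvContrib t := by
  have h := pvWordOf_append [] t
  simpa [pvWordOf_nil] using h

theorem pvTagOf_singleton (t : List String) :
    pvTagOf [t] = PySem.Str.slice (PySem.List.pyGetD t 1 "") (some 2) none := by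
  simp [pvTagOf]

theorem pvTagOf_append (g : List (List String)) (t : List String) :
    pvTagOf (g ++ [t]) = PySem.Str.slice (PySem.List.pyGetD t 1 "") (some 2) none := by
  simp [pvTagOf]

-- the per-element word text (under Pre_) makes its contribution nonempty
theorem pvContrib_ne (t : List String) (ht : PySem.List.pyGetD t 0 "" ≠ "") :
    pvContrib t ≠ "" := by
  unfold pvContrib
  intro h
  rw [String.append_eq_empty_iff] at h
  exact ht h.2

theorem pvWordOf_append_ne (g : List (List String)) (t : List String)
    (ht : PySem.List.pyGetD t 0 "" ≠ "") : pvWordOf (g ++ [t]) ≠ "" := by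
  rw [pvWordOf_append]
  intro h
  rw [String.append_eq_empty_iff] at h
  exact pvContrib_ne t ht h.2

theorem pvInv (l : List (List String)) (hl : ∀ t ∈ l, PySem.List.pyGetD t 0 "" ≠ "") :
    ∀ (done : List (List (List String))) (cur : List (List String)),
    (pvWordOf cur = "" ↔ cur = []) →
    (l.foldl tagUniterStep (pvWordOf cur, pvTagOf cur, done.map pvRender)).2.2
        ++ [[(l.foldl tagUniterStep (pvWordOf cur, pvTagOf cur, done.map pvRender)).1,
             (l.foldl tagUniterStep (pvWordOf cur, pvTagOf cur, done.map pvRender)).2.1]]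
      = ((l.foldl tagUniterGroupStep (done, cur)).1
          ++ [(l.foldl tagUniterGroupStep (done, cur)).2]).map pvRender := by
  induction l with
  | nil =>
    intro done cur _
    simp [pvRender_eq]
  | cons t l ih =>
    intro done cur hcur
    have ht : PySem.List.pyGetD t 0 "" ≠ "" := hl t (by simp)
    have hl' : ∀ t' ∈ l, PySem.List.pyGetD t' 0 "" ≠ "" := fun t' h => hl t' (by simp [h])
    simp only [List.foldl_cons]
    by_cases hB : PySem.Str.pyGet? (PySem.List.pyGetD t 1 "") 0 = some 'B' ∧ pvWordOf cur ≠ ""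
    · have hB1 : PySem.List.pyGet? (PySem.List.pyGetD t 1 "").toList 0 = some 'B' := by
        simpa using hB.1
      have hcne : cur ≠ [] := fun h => hB.2 (hcur.mpr h)
      have hstep : tagUniterStep (pvWordOf cur, pvTagOf cur, done.map pvRender) t
          = (pvWordOf [t], pvTagOf [t], (done ++ [cur]).map pvRender) := by
        unfold tagUniterStep
        simp [hB1, hB.2, pvWordOf_singleton, pvContrib, pvTagOf_singleton, pvRender_eq]
      have hgstep : tagUniterGroupStep (done, cur) t = (done ++ [cur], [t]) := by
        unfold tagUniterGroupStep
        simp [hB1, hcne]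
      rw [hstep, hgstep]
      exact ih hl' (done ++ [cur]) [t]
        (by constructor
            · intro h; exact absurd h (by simpa [pvWordOf_singleton] using pvContrib_ne t ht)
            · intro h; simp at h)
    · have hBb : ¬ (PySem.Str.pyGet? (PySem.List.pyGetD t 1 "") 0 = some 'B' ∧ cur ≠ []) := by
        intro ⟨h1, h2⟩
        exact hB ⟨h1, fun hw => h2 (hcur.mp hw)⟩
      have hstep : tagUniterStep (pvWordOf cur, pvTagOf cur, done.map pvRender) t
          = (pvWordOf (cur ++ [t]), pvTagOf (cur ++ [t]), done.map pvRender) := by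
        unfold tagUniterStep
        simp only [if_neg hB, pvWordOf_append, pvContrib, pvTagOf_append]
        by_cases hI : PySem.List.pyGet? (PySem.List.pyGetD t 1 "").toList 0 = some 'I' <;>
          simp [hI, String.append_assoc]
      have hgstep : tagUniterGroupStep (done, cur) t = (done, cur ++ [t]) := by
        unfold tagUniterGroupStep
        have hBb' : ¬ (PySem.List.pyGet? (PySem.List.pyGetD t 1 "").toList 0 = some 'B' ∧ ¬ cur = []) := by
          simpa [PySem.Str.pyGet?] using hBb
        simp [hBb']
      rw [hstep, hgstep]
      exact ih hl' done (cur ++ [t])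
        (by constructor
            · intro h; exact absurd h (pvWordOf_append_ne cur t ht)
            · intro h; simp at h)

-- Pre_'s getD 1 matters for A's raising; for the invariant we need getD 0 ≠ "" as pyGetD
theorem pvPre_word (l : List (List String)) (hp : Pre_tagUniter l) :
    ∀ t ∈ l, PySem.List.pyGetD t 0 "" ≠ "" := by
  intro t ht
  obtain ⟨_, _, h0⟩ := hp t ht
  simpa [PySem.List.pyGetD_zero] using h0

-- ===== VERDICT (by name: the statement is the Claim_ definition above) =====
theorem tagUniter_spec : Claim_equal_tagUniter := by
  intro l _ hp
  unfold Spec_tagUniter tagUniter tagUniter_alt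
  have h := pvInv l (pvPre_word l hp) [] [] (by simp [pvWordOf_nil])
  simpa [pvWordOf, pvTagOf, PySem.Str.join] using h
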